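-- pv_equiv track=rewrite | github.com/CSMaus/Animation | json_to_bvh.py | create_hierarchy_string
-- ===== SOURCE A (Python) =====
-- def create_hierarchy_string(skeleton, node_type, node_name, indent):
--     hierarchy_string = f"{indent}{node_type} {node_name}\n"
--     hierarchy_string += f"{indent}{{\n"
--     hierarchy_string += f"{indent}\tOFFSET 0.00 0.00 0.00\n"
--     if node_type == "ROOT":
--         hierarchy_string += f"{indent}\tCHANNELS 6 Xposition Yposition Zposition Zrotation Xrotation Yrotation\n"
--     else:
--         hierarchy_string += f"{indent}\tCHANNELS 3 Zrotation Xrotation Yrotation\n"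
--
--     for child_name, child_skeleton in skeleton.get(node_name, {}).items():
--         hierarchy_string += create_hierarchy_string(skeleton, "JOINT", child_name, indent + "\t")
--
--     hierarchy_string += f"{indent}\tEnd Site\n"
--     hierarchy_string += f"{indent}\t{{\n"
--     hierarchy_string += f"{indent}\t\tOFFSET 0.00 0.00 0.00\n"
--     hierarchy_string += f"{indent}\t}}\n"
--     hierarchy_string += f"{indent}}}\n"
--     return hierarchy_string
-- ===== SOURCE B (Python) =====
-- def create_hierarchy_string(skeleton, node_type, node_name, indent):
--     # Iterative DFS with an explicit stack instead of recursion; collects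
--     # the lines in a list and joins once at the end.
--     out = []
--     stack = [("open", node_type, node_name, indent)]
--     while stack:
--         item = stack.pop()
--         if item[0] == "open":
--             _, ntype, name, ind = item
--             out.append(f"{ind}{ntype} {name}\n")
--             out.append(f"{ind}{{\n")
--             out.append(f"{ind}\tOFFSET 0.00 0.00 0.00\n")
--             if ntype == "ROOT":
--                 out.append(f"{ind}\tCHANNELS 6 Xposition Yposition Zposition Zrotation Xrotation Yrotation\n")
--             else:
--                 out.append(f"{ind}\tCHANNELS 3 Zrotation Xrotation Yrotation\n")
--             stack.append(("close", ind))
--             for child_name in reversed(list(skeleton.get(name, {}))):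
--                 stack.append(("open", "JOINT", child_name, ind + "\t"))
--         else:
--             _, ind = item
--             out.append(f"{ind}\tEnd Site\n")
--             out.append(f"{ind}\t{{\n")
--             out.append(f"{ind}\t\tOFFSET 0.00 0.00 0.00\n")
--             out.append(f"{ind}\t}}\n")
--             out.append(f"{ind}}}\n")
--     return "".join(out)
-- ===== Notes on version B (the rewrite author's own statement) =====
-- stated objective: alternative
-- what changed: Replaces A's string-accumulating recursion by an iterative DFS over an explicit stack of open/close work items (children pushed in reverse), collecting lines in a list joined once at the end.
import Mathlib
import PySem

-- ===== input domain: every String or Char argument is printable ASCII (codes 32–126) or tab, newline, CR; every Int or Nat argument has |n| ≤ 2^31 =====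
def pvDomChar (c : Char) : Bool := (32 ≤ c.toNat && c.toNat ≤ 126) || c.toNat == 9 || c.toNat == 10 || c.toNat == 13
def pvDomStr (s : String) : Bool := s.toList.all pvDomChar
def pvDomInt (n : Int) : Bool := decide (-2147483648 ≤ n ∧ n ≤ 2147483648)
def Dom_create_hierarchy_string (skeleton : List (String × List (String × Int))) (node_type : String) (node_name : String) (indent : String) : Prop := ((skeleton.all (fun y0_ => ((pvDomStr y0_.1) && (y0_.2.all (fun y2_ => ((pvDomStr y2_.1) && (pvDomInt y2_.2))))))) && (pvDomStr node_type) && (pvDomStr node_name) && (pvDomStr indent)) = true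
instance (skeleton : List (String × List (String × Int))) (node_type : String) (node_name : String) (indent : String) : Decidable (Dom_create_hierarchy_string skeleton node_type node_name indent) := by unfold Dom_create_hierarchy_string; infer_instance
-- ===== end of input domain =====

-- B replaces A's recursion by an iterative DFS over an explicit stack that appends
-- the lines to a list and joins once at the end (objective: alternative decomposition).
-- Both Lean ports add a depth counter purely as fuel to make the recursion total;
-- inside Pre_ (acyclic child graph) the fuel is never exhausted.

-- ===== PORT A =====
-- skeleton.get(node_name, {}) (first-match dict lookup, default empty)
def pvChildren (skeleton : List (String × List (String × Int))) (n : String) : List (String × Int) :=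
  ((PySem.Dict.mk skeleton).get? n).getD []

-- list(skeleton.get(name, {})): the child names in insertion order
def pvChildNames (skeleton : List (String × List (String × Int))) (n : String) : List String :=
  (pvChildren skeleton n).map Prod.fst

-- literal transliteration of A's recursion; the Nat argument is fuel only
def pvRenderA (skeleton : List (String × List (String × Int))) : Nat → String → String → String → String
  | 0, _, _, _ => ""   -- fuel exhausted (unreachable under Pre_: Python A raises RecursionError instead)
  | f+1, node_type, node_name, indent =>
    let s := indent ++ node_type ++ " " ++ node_name ++ "\n"
    let s := s ++ indent ++ "{\n"
    let s := s ++ indent ++ "\tOFFSET 0.00 0.00 0.00\n"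
    let s := if node_type == "ROOT"
      then s ++ indent ++ "\tCHANNELS 6 Xposition Yposition Zposition Zrotation Xrotation Yrotation\n"
      else s ++ indent ++ "\tCHANNELS 3 Zrotation Xrotation Yrotation\n"
    let s := (pvChildren skeleton node_name).foldl
      (fun acc c => acc ++ pvRenderA skeleton f "JOINT" c.1 (indent ++ "\t")) s
    s ++ indent ++ "\tEnd Site\n" ++ indent ++ "\t{\n" ++ indent ++ "\t\tOFFSET 0.00 0.00 0.00\n"
      ++ indent ++ "\t}\n" ++ indent ++ "}\n"

def create_hierarchy_string (skeleton : List (String × List (String × Int))) (node_type : String) (node_name : String) (indent : String) : String :=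
  pvRenderA skeleton (skeleton.length + 2) node_type node_name indent

-- ===== PORT B =====
-- a work item of B's explicit stack: an unvisited node (with its fuel) or a close marker
inductive PvItem where
  | opn : Nat → String → String → String → PvItem
  | cls : String → PvItem
deriving Repr, DecidableEq

-- termination measure helpers for the stack machine
def pvMaxLen (skeleton : List (String × List (String × Int))) : Nat :=
  skeleton.foldr (fun p m => max p.2.length m) 0

def pvWeight (L : Nat) : PvItem → Nat
  | .opn f _ _ _ => (L+2)^(f+1)
  | .cls _ => 1

theorem pvChildren_len_le (skeleton : List (String × List (String × Int))) (n : String) :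
    (pvChildren skeleton n).length ≤ pvMaxLen skeleton := by
  induction skeleton with
  | nil => simp [pvChildren, PySem.Dict.get?, pvMaxLen]
  | cons p rest ih =>
    obtain ⟨k, v⟩ := p
    by_cases h : (k == n) = true
    · simp [pvChildren, PySem.Dict.get?_mk_cons, h, pvMaxLen]
    · simp only [pvChildren, PySem.Dict.get?_mk_cons, if_neg h] at ⊢
      simp only [pvChildren] at ih
      simp only [pvMaxLen, List.foldr_cons] at ih ⊢
      omega

-- B's while-loop over the explicit stack (head of the list = top of the stack);
-- the fuel carried by each open item is a termination device only
def pvRunB (skeleton : List (String × List (String × Int))) (stack : List PvItem) (out : List String) : List String :=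
  match stack with
  | [] => out
  | .opn 0 _ _ _ :: rest => pvRunB skeleton rest out   -- fuel exhausted (unreachable under Pre_)
  | .opn (f+1) ntype name ind :: rest =>
    let out' := out ++
      [ind ++ ntype ++ " " ++ name ++ "\n",
       ind ++ "{\n",
       ind ++ "\tOFFSET 0.00 0.00 0.00\n",
       if ntype == "ROOT"
         then ind ++ "\tCHANNELS 6 Xposition Yposition Zposition Zrotation Xrotation Yrotation\n"
         else ind ++ "\tCHANNELS 3 Zrotation Xrotation Yrotation\n"]
    -- push the close marker, then the children reversed: head of the list is the
    -- top of the stack, so the resulting stack is children-in-order ++ close ++ rest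
    pvRunB skeleton
      (((pvChildNames skeleton name).map (fun c => PvItem.opn f "JOINT" c (ind ++ "\t"))) ++ (PvItem.cls ind :: rest))
      out'
  | .cls ind :: rest =>
    pvRunB skeleton rest (out ++
      [ind ++ "\tEnd Site\n",
       ind ++ "\t{\n",
       ind ++ "\t\tOFFSET 0.00 0.00 0.00\n",
       ind ++ "\t}\n",
       ind ++ "}\n"])
termination_by (stack.map (pvWeight (pvMaxLen skeleton))).sum
decreasing_by
  · simp [pvWeight]
  · have hlen : (pvChildNames skeleton name).length ≤ pvMaxLen skeleton := by
      simpa [pvChildNames] using pvChildren_len_le skeleton name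
    have hx : 1 ≤ (pvMaxLen skeleton + 2) ^ (f + 1) := Nat.one_le_pow _ _ (by omega)
    simp only [List.map_append, List.map_map, List.sum_append, List.map_cons, List.sum_cons,
      pvWeight, Function.comp_def] at *
    simp only [List.map_const', List.sum_replicate, smul_eq_mul] at *
    have hmul : (pvChildNames skeleton name).length * (pvMaxLen skeleton + 2) ^ (f + 1)
        ≤ pvMaxLen skeleton * (pvMaxLen skeleton + 2) ^ (f + 1) :=
      Nat.mul_le_mul_right _ hlen
    have hpow : (pvMaxLen skeleton + 2) ^ (f + 1 + 1)
        = pvMaxLen skeleton * (pvMaxLen skeleton + 2) ^ (f + 1) + 2 * (pvMaxLen skeleton + 2) ^ (f + 1) := by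
      ring
    simp only [Nat.succ_eq_add_one] at *
    omega
  · simp [pvWeight]

def create_hierarchy_string_alt (skeleton : List (String × List (String × Int))) (node_type : String) (node_name : String) (indent : String) : String :=
  PySem.Str.join "" (pvRunB skeleton [PvItem.opn (skeleton.length + 2) node_type node_name indent] [])

-- ===== PRECONDITION & SPEC =====
-- Pre_ excludes exactly the skeletons whose child graph has a cycle reachable from
-- node_name: there the Python A raises RecursionError (and B's loop does not finish).
def pvExpand (skeleton : List (String × List (String × Int))) (s : List String) : List String :=
  (s ++ s.flatMap (pvChildNames skeleton)).dedup

def pvReach (skeleton : List (String × List (String × Int))) (start : List String) : List String :=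
  (pvExpand skeleton)^[skeleton.length + (skeleton.map (fun p => p.2.length)).sum + 2] start

def Pre_create_hierarchy_string (skeleton : List (String × List (String × Int))) (node_type : String) (node_name : String) (indent : String) : Prop :=
  ∀ n ∈ pvReach skeleton [node_name], n ∉ pvReach skeleton (pvChildNames skeleton n)

instance (skeleton : List (String × List (String × Int))) (node_type : String) (node_name : String) (indent : String) : Decidable (Pre_create_hierarchy_string skeleton node_type node_name indent) := by
  unfold Pre_create_hierarchy_string; infer_instance

def pvWitness_create_hierarchy_string : (List (String × List (String × Int))) × String × String × String :=
  ([("Hips", [("Spine", 0)]), ("Spine", [])], "ROOT", "Hips", "")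

def Spec_create_hierarchy_string (skeleton : List (String × List (String × Int))) (node_type : String) (node_name : String) (indent : String) (out : String) : Prop := out = create_hierarchy_string_alt skeleton node_type node_name indent
instance (skeleton : List (String × List (String × Int))) (node_type : String) (node_name : String) (indent : String) (out : String) : Decidable (Spec_create_hierarchy_string skeleton node_type node_name indent out) := by unfold Spec_create_hierarchy_string; infer_instance

-- ===== CLAIM (what is proved, stated in full; the proofs are below) =====
def Claim_equal_create_hierarchy_string : Prop := ∀ (skeleton : List (String × List (String × Int))) (node_type : String) (node_name : String) (indent : String), Dom_create_hierarchy_string skeleton node_type node_name indent → Pre_create_hierarchy_string skeleton node_type node_name indent → Spec_create_hierarchy_string skeleton node_type node_name indent (create_hierarchy_string skeleton node_type node_name indent)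

-- ===== LEMMAS AND PROOFS =====
-- (the two ports agree even without the Pre_ hypothesis: both use the same fuel)

theorem pv_intercalate_nil (xs : List (List Char)) : List.intercalate ([] : List Char) xs = xs.flatten := by
  induction xs with
  | nil => simp [List.intercalate]
  | cons h t ih => cases t <;> simp_all [List.intercalate, List.intersperse]

theorem pv_join_nil : PySem.Str.join "" [] = "" := by
  simp [PySem.Str.join, PySem.Chars.join, pv_intercalate_nil]

theorem pv_join_cons (a : String) (l : List String) :
    PySem.Str.join "" (a :: l) = a ++ PySem.Str.join "" l := by
  simp [PySem.Str.join, PySem.Chars.join, pv_intercalate_nil, String.ofList_append]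

theorem pv_join_append (l₁ l₂ : List String) :
    PySem.Str.join "" (l₁ ++ l₂) = PySem.Str.join "" l₁ ++ PySem.Str.join "" l₂ := by
  induction l₁ with
  | nil => simp [pv_join_nil]
  | cons a t ih => simp [pv_join_cons, ih, String.append_assoc]

theorem pv_join_flatMap {α : Type} (g : α → List String) (cs : List α) :
    PySem.Str.join "" (cs.flatMap g) = PySem.Str.join "" (cs.map (fun c => PySem.Str.join "" (g c))) := by
  induction cs with
  | nil => simp
  | cons a t ih => simp [List.flatMap_cons, pv_join_append, pv_join_cons, ih]

theorem pv_foldl_str {α : Type} (h : α → String) (cs : List α) :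
    ∀ s0 : String, cs.foldl (fun a c => a ++ h c) s0 = s0 ++ PySem.Str.join "" (cs.map h) := by
  induction cs with
  | nil => intro s0; simp [pv_join_nil]
  | cons a t ih => intro s0; simp [pv_join_cons, ih, String.append_assoc]

-- the lines emitted for one node, as a list (proof-side denotation of both ports)
def pvHdr (t n i : String) : List String :=
  [i ++ t ++ " " ++ n ++ "\n",
   i ++ "{\n",
   i ++ "\tOFFSET 0.00 0.00 0.00\n",
   if t == "ROOT"
     then i ++ "\tCHANNELS 6 Xposition Yposition Zposition Zrotation Xrotation Yrotation\n"
     else i ++ "\tCHANNELS 3 Zrotation Xrotation Yrotation\n"]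

def pvTail (i : String) : List String :=
  [i ++ "\tEnd Site\n", i ++ "\t{\n", i ++ "\t\tOFFSET 0.00 0.00 0.00\n", i ++ "\t}\n", i ++ "}\n"]

def pvLines (skeleton : List (String × List (String × Int))) : Nat → String → String → String → List String
  | 0, _, _, _ => []
  | f+1, t, n, i =>
    pvHdr t n i ++ ((pvChildNames skeleton n).flatMap (fun c => pvLines skeleton f "JOINT" c (i ++ "\t"))) ++ pvTail i

theorem pvRunB_open (skeleton : List (String × List (String × Int))) :
    ∀ (f : Nat) (t n i : String) (stack : List PvItem) (out : List String),
      pvRunB skeleton (PvItem.opn f t n i :: stack) out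
        = pvRunB skeleton stack (out ++ pvLines skeleton f t n i) := by
  intro f
  induction f with
  | zero => intro t n i stack out; rw [pvRunB]; simp [pvLines]
  | succ f ih =>
    intro t n i stack out
    rw [pvRunB]
    have aux : ∀ (cs : List String) (stack' : List PvItem) (out' : List String),
        pvRunB skeleton ((cs.map (fun c => PvItem.opn f "JOINT" c (i ++ "\t"))) ++ stack') out'
          = pvRunB skeleton stack' (out' ++ cs.flatMap (fun c => pvLines skeleton f "JOINT" c (i ++ "\t"))) := by
      intro cs
      induction cs with
      | nil => intro stack' out'; simp
      | cons c rest ihc =>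
        intro stack' out'
        simp only [List.map_cons, List.cons_append, List.flatMap_cons]
        rw [ih, ihc, List.append_assoc]
    rw [aux]
    rw [pvRunB]
    simp [pvLines, pvHdr, pvTail]

theorem pvRenderA_eq_join (skeleton : List (String × List (String × Int))) :
    ∀ (f : Nat) (t n i : String),
      pvRenderA skeleton f t n i = PySem.Str.join "" (pvLines skeleton f t n i) := by
  intro f
  induction f with
  | zero => intro t n i; simp [pvRenderA, pvLines, pv_join_nil]
  | succ f ih =>
    intro t n i
    rw [pvRenderA, pvLines]
    rw [pv_join_append, pv_join_append]
    have hflat : PySem.Str.join "" ((pvChildNames skeleton n).flatMap (fun c => pvLines skeleton f "JOINT" c (i ++ "\t")))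
        = PySem.Str.join "" ((pvChildren skeleton n).map (fun c => pvRenderA skeleton f "JOINT" c.1 (i ++ "\t"))) := by
      rw [pv_join_flatMap]
      simp only [pvChildNames, List.map_map]
      congr 1
      exact (List.map_congr_left (fun c _ => (ih "JOINT" c.1 (i ++ "\t")).symm))
    rw [pv_foldl_str, hflat]
    by_cases hR : (t == "ROOT") = true <;>
      simp [pvHdr, pvTail, hR, pv_join_cons, pv_join_nil, String.append_assoc]

-- ===== VERDICT (by name: the statement is the Claim_ definition above) =====
theorem create_hierarchy_string_spec : Claim_equal_create_hierarchy_string := by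
  intro skeleton node_type node_name indent _ _
  unfold Spec_create_hierarchy_string create_hierarchy_string create_hierarchy_string_alt
  rw [pvRunB_open, pvRenderA_eq_join]
  rw [pvRunB]
  simp
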